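-- pv_equiv track=rewrite | github.com/Elelia04/Rosalind_exercises2 | Overlap_funct.py | find_overlap_k
-- ===== SOURCE A (Python) =====
-- def find_overlap_k(seq1, seq2):
--     min_len = min(len(seq1), len(seq2))
--     count = 0
--     letters = []
--
--     for k in range(1, min_len + 1):
--         if seq1[-k:] == seq2[:k]:
--             count += 1
--
--     return count
-- ===== SOURCE B (Python) =====
-- def find_overlap_k(seq1, seq2):
--     BASE = 1114112  # > any Unicode code point, so the encoding is injective
--     n1 = len(seq1)
--     m = min(n1, len(seq2))
--     count = 0
--     pref = 0   # base-BASE number encoding seq2[:k]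
--     suf = 0    # base-BASE number encoding seq1[-k:]
--     power = 1  # BASE**(k-1) entering iteration k
--     for k in range(1, m + 1):
--         pref = pref * BASE + ord(seq2[k - 1])
--         suf = ord(seq1[n1 - k]) * power + suf
--         power = power * BASE
--         if pref == suf:
--             count += 1
--     return count
-- ===== Notes on version B (the rewrite author's own statement) =====
-- stated objective: alternative
-- what changed: Replaces A's per-k slice-and-compare (building seq1[-k:] and seq2[:k] strings each iteration) with a single pass that maintains exact base-1114112 integer encodings of the current prefix of seq2 and suffix of seq1 and counts k where the two numbers are equal; equality of the numbers is equivalent to equality of the strings because the encoding is injective on equal-length strings.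
import Mathlib
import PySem

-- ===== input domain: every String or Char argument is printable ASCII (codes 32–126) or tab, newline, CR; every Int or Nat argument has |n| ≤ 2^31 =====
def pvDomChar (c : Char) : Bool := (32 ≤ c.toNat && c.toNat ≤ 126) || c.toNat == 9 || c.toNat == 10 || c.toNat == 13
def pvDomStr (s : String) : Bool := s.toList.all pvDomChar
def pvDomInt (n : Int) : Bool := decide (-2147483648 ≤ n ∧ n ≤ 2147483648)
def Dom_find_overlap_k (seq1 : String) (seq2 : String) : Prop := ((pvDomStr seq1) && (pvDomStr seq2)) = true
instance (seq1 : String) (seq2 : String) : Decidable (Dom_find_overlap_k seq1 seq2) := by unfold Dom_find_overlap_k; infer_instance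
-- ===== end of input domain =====

-- B replaces A's per-k slice comparison with a single pass that maintains rolling exact
-- base-1114112 integer encodings of seq2's prefix and seq1's suffix (alternative algorithm; equal results proved).


-- ===== PORT A =====
def find_overlap_k (seq1 : String) (seq2 : String) : Int :=
  let min_len : Int := min (PySem.Str.len seq1) (PySem.Str.len seq2)
  (PySem.List.pyRange 1 (min_len + 1) 1).foldl
    (fun count k =>
      if PySem.Str.slice seq1 (some (-k)) none = PySem.Str.slice seq2 none (some k)
      then count + 1 else count)
    0

-- ===== PORT B =====
def find_overlap_k_alt (seq1 : String) (seq2 : String) : Int :=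
  let n1 : Int := PySem.Str.len seq1
  let m : Int := min n1 (PySem.Str.len seq2)
  let st := (PySem.List.pyRange 1 (m + 1) 1).foldl
    (fun (st : Int × Nat × Nat × Nat) k =>
      let count := st.1
      let pref := st.2.1
      let suf := st.2.2.1
      let power := st.2.2.2
      let pref := pref * 1114112 + (PySem.List.pyGetD seq2.toList (k - 1) ' ').toNat
      let suf := (PySem.List.pyGetD seq1.toList (n1 - k) ' ').toNat * power + suf
      let power := power * 1114112
      (if pref = suf then count + 1 else count, pref, suf, power))
    (0, 0, 0, 1)
  st.1

-- ===== PRECONDITION & SPEC =====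
def Spec_find_overlap_k (seq1 : String) (seq2 : String) (out : Int) : Prop := out = find_overlap_k_alt seq1 seq2
instance (seq1 : String) (seq2 : String) (out : Int) : Decidable (Spec_find_overlap_k seq1 seq2 out) := by unfold Spec_find_overlap_k; infer_instance

-- ===== CLAIM (what is proved, stated in full; the proofs are below) =====
def Claim_equal_find_overlap_k : Prop := ∀ (seq1 : String) (seq2 : String), Dom_find_overlap_k seq1 seq2 → Spec_find_overlap_k seq1 seq2 (find_overlap_k seq1 seq2)

-- ===== LEMMAS AND PROOFS =====

-- exact base-1114112 positional encoding of a character list (1114112 > every Char code)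
def pvEnc (l : List Char) : Nat := l.foldl (fun a c => a * 1114112 + c.toNat) 0

-- the common counting spec: number of k in 1..m with seq1-suffix k = seq2-prefix k
def pvCnt (s1 s2 : List Char) : Nat → Int
  | 0 => 0
  | m+1 => pvCnt s1 s2 m + (if s1.drop (s1.length - (m+1)) = s2.take (m+1) then 1 else 0)

theorem pvEnc_foldl (l : List Char) (a : Nat) :
    l.foldl (fun a c => a * 1114112 + c.toNat) a = a * 1114112 ^ l.length + pvEnc l := by
  induction l generalizing a with
  | nil => simp [pvEnc]
  | cons c t ih =>
    simp only [List.foldl_cons, List.length_cons, pvEnc]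
    rw [ih, ih]
    ring

theorem pvEnc_cons (c : Char) (l : List Char) :
    pvEnc (c :: l) = c.toNat * 1114112 ^ l.length + pvEnc l := by
  simp only [pvEnc, List.foldl_cons]
  rw [show (0 * 1114112 + c.toNat) = c.toNat by omega, pvEnc_foldl]
  rfl

theorem pvEnc_append_singleton (l : List Char) (c : Char) :
    pvEnc (l ++ [c]) = pvEnc l * 1114112 + c.toNat := by
  simp [pvEnc, List.foldl_append]

theorem pvEnc_lt (l : List Char) : pvEnc l < 1114112 ^ l.length := by
  induction l with
  | nil => simp [pvEnc]
  | cons c t ih =>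
    have hc : c.toNat < 1114112 := by
      have h := c.valid
      unfold UInt32.isValidChar Nat.isValidChar at h
      have hv : c.toNat = c.val.toNat := rfl
      rw [hv]
      rcases h with h | h
      · have h' : c.val.toNat < (0xd800 : UInt32).toNat := h
        simpa using Nat.lt_trans h' (by decide)
      · have h' : c.val.toNat < (0x110000 : UInt32).toNat := h.2
        simpa using Nat.lt_of_lt_of_le h' (by decide)
    rw [pvEnc_cons, List.length_cons, pow_succ]
    calc c.toNat * 1114112 ^ t.length + pvEnc t
        < c.toNat * 1114112 ^ t.length + 1114112 ^ t.length := by omega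
      _ = (c.toNat + 1) * 1114112 ^ t.length := by ring
      _ ≤ 1114112 * 1114112 ^ t.length := Nat.mul_le_mul_right _ (by omega)
      _ = 1114112 ^ t.length * 1114112 := by ring

theorem pvEnc_inj (l1 l2 : List Char) (hl : l1.length = l2.length)
    (h : pvEnc l1 = pvEnc l2) : l1 = l2 := by
  induction l1 generalizing l2 with
  | nil => cases l2 with
    | nil => rfl
    | cons b t2 => simp at hl
  | cons a t1 ih =>
    cases l2 with
    | nil => simp at hl
    | cons b t2 =>
      simp only [List.length_cons, Nat.add_right_cancel_iff] at hl
      rw [pvEnc_cons, pvEnc_cons, ← hl] at h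
      have e1 : pvEnc t1 < 1114112 ^ t1.length := pvEnc_lt t1
      have e2 : pvEnc t2 < 1114112 ^ t1.length := hl ▸ pvEnc_lt t2
      have hP : 0 < 1114112 ^ t1.length := Nat.pow_pos (by omega)
      have hab : a.toNat = b.toNat := by
        have d1 : (a.toNat * 1114112 ^ t1.length + pvEnc t1) / 1114112 ^ t1.length = a.toNat := by
          rw [mul_comm, Nat.mul_add_div hP, Nat.div_eq_of_lt e1, Nat.add_zero]
        have d2 : (b.toNat * 1114112 ^ t1.length + pvEnc t2) / 1114112 ^ t1.length = b.toNat := by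
          rw [mul_comm, Nat.mul_add_div hP, Nat.div_eq_of_lt e2, Nat.add_zero]
        rw [← d1, ← d2, h]
      have hchar : a = b := Char.ext (UInt32.toNat_inj.mp hab)
      have ht : pvEnc t1 = pvEnc t2 := by rw [hab] at h; omega
      rw [hchar, ih t2 hl ht]

-- A's slice condition at k = m+1, read on lists
theorem pvCondA (seq1 seq2 : String) (m : Nat) :
    (PySem.Str.slice seq1 (some (-((m:Int)+1))) none = PySem.Str.slice seq2 none (some ((m:Int)+1)))
      ↔ seq1.toList.drop (seq1.toList.length - (m+1)) = seq2.toList.take (m+1) := by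
  rw [← String.toList_inj]
  have h1 : (PySem.Str.slice seq1 (some (-((m:Int)+1))) none).toList
      = seq1.toList.drop (seq1.toList.length - (m+1)) := by
    have h : -((m:Int)+1) = -(((m+1 : Nat)) : Int) := by push_cast; ring
    rw [h, PySem.Str.toList_slice, PySem.Chars.slice_eq_listSlice,
      PySem.List.slice_from_neg_natCast _ _ (by omega)]
  have h2 : (PySem.Str.slice seq2 none (some ((m:Int)+1))).toList = seq2.toList.take (m+1) := by
    have h : ((m:Int)+1) = (((m+1 : Nat)) : Int) := by push_cast; ring
    rw [h, PySem.Str.toList_slice, PySem.Chars.slice_eq_listSlice, PySem.List.slice_to_natCast]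
  rw [h1, h2]

theorem pvLemA (seq1 seq2 : String) (m : Nat) :
    (PySem.List.pyRange 1 ((m:Int) + 1) 1).foldl
      (fun count k =>
        if PySem.Str.slice seq1 (some (-k)) none = PySem.Str.slice seq2 none (some k)
        then count + 1 else count) 0
    = pvCnt seq1.toList seq2.toList m := by
  induction m with
  | zero => rw [PySem.List.pyRange_one_eq_nil (by norm_num)]; rfl
  | succ m ih =>
    have hc : ((m+1 : Nat) : Int) + 1 = ((m:Int) + 1) + 1 := by push_cast; ring
    rw [hc, PySem.List.pyRange_one_succ_right (by omega), List.foldl_append, ih]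
    simp only [List.foldl_cons, List.foldl_nil, pvCnt]
    rw [if_congr (pvCondA seq1 seq2 m) rfl rfl]
    split_ifs <;> ring

theorem pvLemB (seq1 seq2 : String) (m : Nat)
    (hm1 : m ≤ seq1.toList.length) (hm2 : m ≤ seq2.toList.length) :
    (PySem.List.pyRange 1 ((m:Int) + 1) 1).foldl
      (fun (st : Int × Nat × Nat × Nat) k =>
        let count := st.1
        let pref := st.2.1
        let suf := st.2.2.1
        let power := st.2.2.2
        let pref := pref * 1114112 + (PySem.List.pyGetD seq2.toList (k - 1) ' ').toNat
        let suf := (PySem.List.pyGetD seq1.toList ((PySem.Str.len seq1) - k) ' ').toNat * power + suf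
        let power := power * 1114112
        (if pref = suf then count + 1 else count, pref, suf, power))
      (0, 0, 0, 1)
    = (pvCnt seq1.toList seq2.toList m,
       pvEnc (seq2.toList.take m),
       pvEnc (seq1.toList.drop (seq1.toList.length - m)),
       1114112 ^ m) := by
  induction m with
  | zero =>
    rw [PySem.List.pyRange_one_eq_nil (by norm_num)]
    simp only [List.foldl_nil, pvCnt, List.take_zero, Nat.sub_zero, List.drop_length, pow_zero]
    simp [pvEnc]
  | succ m ih =>
    have hm1' : m ≤ seq1.toList.length := Nat.le_of_succ_le hm1
    have hm2' : m ≤ seq2.toList.length := Nat.le_of_succ_le hm2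
    have hc : ((m+1 : Nat) : Int) + 1 = ((m:Int) + 1) + 1 := by push_cast; ring
    rw [hc, PySem.List.pyRange_one_succ_right (by omega), List.foldl_append, ih hm1' hm2']
    simp only [List.foldl_cons, List.foldl_nil]
    -- the two characters read at step k = m+1
    have hget2 : PySem.List.pyGetD seq2.toList (((m:Int) + 1) - 1) ' ' = seq2.toList[m]'(by omega) := by
      rw [show ((m:Int) + 1) - 1 = ((m : Nat) : Int) by ring, PySem.List.pyGetD_natCast]
      exact List.getD_eq_getElem _ _ (by omega)
    have hget1 : PySem.List.pyGetD seq1.toList ((PySem.Str.len seq1) - ((m:Int) + 1)) ' '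
        = seq1.toList[seq1.toList.length - (m+1)]'(by omega) := by
      rw [show (PySem.Str.len seq1) - ((m:Int) + 1)
            = ((seq1.toList.length - (m+1) : Nat) : Int) by
          rw [PySem.Str.len_eq]; push_cast [Nat.cast_sub hm1]; ring,
        PySem.List.pyGetD_natCast]
      exact List.getD_eq_getElem _ _ (by omega)
    -- prefix encoding update
    have hpref : pvEnc (seq2.toList.take m) * 1114112 + (seq2.toList[m]'(by omega)).toNat
        = pvEnc (seq2.toList.take (m+1)) := by
      rw [← List.take_concat_get (l := seq2.toList) (i := m) (by omega), List.concat_eq_append, pvEnc_append_singleton]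
    -- suffix encoding update
    have hdrop : seq1.toList.drop (seq1.toList.length - (m+1))
        = (seq1.toList[seq1.toList.length - (m+1)]'(by omega)) :: seq1.toList.drop (seq1.toList.length - m) := by
      rw [show seq1.toList.length - m = (seq1.toList.length - (m+1)) + 1 by omega]
      exact List.drop_eq_getElem_cons (by omega)
    have hlendrop : (seq1.toList.drop (seq1.toList.length - m)).length = m := by
      rw [List.length_drop]; omega
    have hsuf : (seq1.toList[seq1.toList.length - (m+1)]'(by omega)).toNat * 1114112 ^ m
          + pvEnc (seq1.toList.drop (seq1.toList.length - m))
        = pvEnc (seq1.toList.drop (seq1.toList.length - (m+1))) := by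
      rw [hdrop, pvEnc_cons, hlendrop]
    -- the number comparison decides the string comparison
    have hcond : (pvEnc (seq2.toList.take (m+1)) = pvEnc (seq1.toList.drop (seq1.toList.length - (m+1))))
        ↔ seq1.toList.drop (seq1.toList.length - (m+1)) = seq2.toList.take (m+1) := by
      constructor
      · intro h
        refine (pvEnc_inj _ _ ?_ h).symm
        rw [List.length_take, List.length_drop]
        omega
      · intro h
        rw [h]
    simp only [hget2, hget1, hpref]
    rw [hsuf]
    simp only [pvCnt]
    rw [if_congr hcond rfl rfl]
    have hpow : 1114112 ^ m * 1114112 = 1114112 ^ (m+1) := (pow_succ 1114112 m).symm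
    rw [hpow]
    split_ifs <;> simp

theorem pvMin_cast (seq1 seq2 : String) :
    min (PySem.Str.len seq1) (PySem.Str.len seq2)
      = ((min seq1.toList.length seq2.toList.length : Nat) : Int) := by
  rw [PySem.Str.len_eq, PySem.Str.len_eq, ← Nat.cast_min]

-- ===== VERDICT (by name: the statement is the Claim_ definition above) =====
theorem find_overlap_k_spec : Claim_equal_find_overlap_k := by
  unfold Claim_equal_find_overlap_k Spec_find_overlap_k
  intro seq1 seq2 _
  simp only [find_overlap_k, find_overlap_k_alt]
  rw [pvMin_cast]
  rw [pvLemA seq1 seq2 (min seq1.toList.length seq2.toList.length)]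
  rw [pvLemB seq1 seq2 (min seq1.toList.length seq2.toList.length)
      (Nat.min_le_left _ _) (Nat.min_le_right _ _)]
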